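-- pv_equiv track=rewrite | github.com/xlyds/python-misc | Modules/hand.py | hasStraightFlush
-- ===== SOURCE A (Python) =====
-- def hasStraightFlush(S,R):
-- 	for key1 in S:
-- 		if S[key1]==5:
-- 			for i in range(1,9):
-- 				if R[i]==1 and R[i+1]==1 and R[i+2]==1 and R[i+3]==1 and R[i+4]==1:
-- 					return True
-- 				pass
-- 	return False
-- ===== SOURCE B (Python) =====
-- def hasStraightFlush(S, R):
--     if 5 not in S.values():
--         return False
--     run = 0
--     for i in range(1, 13):
--         if R.get(i) == 1:
--             run += 1
--             if run == 5:
--                 return True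
--         else:
--             run = 0
--     return False
-- ===== Notes on version B (the rewrite author's own statement) =====
-- stated objective: alternative
-- what changed: B tests the flush once via '5 in S.values()' instead of re-running the straight scan for every qualifying suit key, and replaces the eight fixed 5-cell window conjunctions with a single run-length pass over ranks 1..12 that counts consecutive ones
-- outside the precondition, e.g. on hasStraightFlush({'a': 5}, {1: 1, 2: 1, 3: 1, 4: 1, 5: 1}): A returns True, B returns True
import Mathlib
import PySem

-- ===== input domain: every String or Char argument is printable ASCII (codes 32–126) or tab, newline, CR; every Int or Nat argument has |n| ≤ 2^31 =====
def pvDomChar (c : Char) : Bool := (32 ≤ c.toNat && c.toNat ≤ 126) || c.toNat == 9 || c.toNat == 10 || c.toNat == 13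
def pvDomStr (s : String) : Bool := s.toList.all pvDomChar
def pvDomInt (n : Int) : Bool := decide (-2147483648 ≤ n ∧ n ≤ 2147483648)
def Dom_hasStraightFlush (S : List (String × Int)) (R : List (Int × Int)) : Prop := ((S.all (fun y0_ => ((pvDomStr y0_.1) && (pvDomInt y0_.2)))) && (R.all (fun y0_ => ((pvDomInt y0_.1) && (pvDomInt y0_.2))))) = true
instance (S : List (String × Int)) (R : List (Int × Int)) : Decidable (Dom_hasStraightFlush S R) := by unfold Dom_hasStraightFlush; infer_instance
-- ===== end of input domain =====

-- B checks the flush once (5 ∈ suit counts) and finds the straight with one run-length pass over ranks 1..12, instead of A's per-suit rescan of eight fixed 5-cell windows.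


-- ===== PORT A =====
-- R[i] == 1 (a missing key raises in Python; Pre_ keeps A's lookups in range)
def sfLookup1 (R : List (Int × Int)) (i : Int) : Bool := (PySem.Dict.mk R).get? i == some (1 : Int)

def hasStraightFlush (S : List (String × Int)) (R : List (Int × Int)) : Bool :=
  S.any (fun kv =>
    ((PySem.Dict.mk S).get? kv.1 == some (5 : Int)) &&
    (PySem.List.pyRange 1 9 1).any (fun i =>
      sfLookup1 R i && sfLookup1 R (i + 1) && sfLookup1 R (i + 2) && sfLookup1 R (i + 3) && sfLookup1 R (i + 4)))

-- ===== PORT B =====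
-- one step of Source B's run-length loop: freeze once found, else extend or reset the run
def sfRunStep (b : Bool) (st : Int × Bool) : Int × Bool :=
  if st.2 then st else if b then (st.1 + 1, st.1 + 1 == 5) else ((0 : Int), false)

def hasStraightFlush_alt (S : List (String × Int)) (R : List (Int × Int)) : Bool :=
  if ((PySem.Dict.mk S).values.contains (5 : Int)) = false then false
  else ((PySem.List.pyRange 1 13 1).foldl (fun st i => sfRunStep (sfLookup1 R i) st) ((0 : Int), false)).2

-- ===== PRECONDITION & SPEC =====
-- Pre_ requires dict-shaped S (distinct keys — always true for a Python dict) and, when some suit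
-- count is 5, that ranks 1..12 all be keys of R: outside that A's chained R[i] lookups may raise
-- KeyError; whether A raises or returns there depends on the values met during the scan, so this
-- closed-form condition is slightly wider than the exact raise set (see cites).
def Pre_hasStraightFlush (S : List (String × Int)) (R : List (Int × Int)) : Prop :=
  (S.map Prod.fst).Nodup ∧
  ((5 : Int) ∈ S.map Prod.snd → ∀ i ∈ PySem.List.pyRange 1 13 1, ((PySem.Dict.mk R).get? i).isSome)
instance (S : List (String × Int)) (R : List (Int × Int)) : Decidable (Pre_hasStraightFlush S R) := by unfold Pre_hasStraightFlush; infer_instance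

def pvWitness_hasStraightFlush : (List (String × Int)) × (List (Int × Int)) :=
  ([("C", 2), ("D", 3)], [(1, 1), (2, 0)])

def Spec_hasStraightFlush (S : List (String × Int)) (R : List (Int × Int)) (out : Bool) : Prop := out = hasStraightFlush_alt S R
instance (S : List (String × Int)) (R : List (Int × Int)) (out : Bool) : Decidable (Spec_hasStraightFlush S R out) := by unfold Spec_hasStraightFlush; infer_instance

-- ===== CLAIM (what is proved, stated in full; the proofs are below) =====
def Claim_equal_hasStraightFlush : Prop := ∀ (S : List (String × Int)) (R : List (Int × Int)), Dom_hasStraightFlush S R → Pre_hasStraightFlush S R → Spec_hasStraightFlush S R (hasStraightFlush S R)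

-- ===== LEMMAS AND PROOFS =====

lemma sfAnyAndConst {α : Type} (l : List α) (p : α → Bool) (c : Bool) :
    l.any (fun x => p x && c) = (l.any p && c) := by
  cases c <;> simp

lemma sfFlush (S : List (String × Int)) (h : (S.map Prod.fst).Nodup) :
    S.any (fun kv => (PySem.Dict.mk S).get? kv.1 == some (5 : Int))
      = (PySem.Dict.mk S).values.contains (5 : Int) := by
  have hk : (PySem.Dict.mk S).keys.Nodup := by simpa [PySem.Dict.keys] using h
  rw [Bool.eq_iff_iff]
  simp only [List.any_eq_true, beq_iff_eq, List.contains_eq_mem, decide_eq_true_eq,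
    PySem.Dict.values, List.mem_map]
  constructor
  · rintro ⟨kv, hmem, hget⟩
    exact ⟨(kv.1, 5), PySem.Dict.mem_items_of_get?_eq_some _ hget, rfl⟩
  · rintro ⟨kv, hmem, hv⟩
    refine ⟨kv, hmem, ?_⟩
    rw [PySem.Dict.get?_of_mem_items (PySem.Dict.mk S) hmem hk, hv]

lemma sfRange9 : PySem.List.pyRange 1 9 1 = [1, 2, 3, 4, 5, 6, 7, 8] := by decide
lemma sfRange13 : PySem.List.pyRange 1 13 1 = [1, 2, 3, 4, 5, 6, 7, 8, 9, 10, 11, 12] := by decide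

lemma sfBool12 : ∀ (b1 b2 b3 b4 b5 b6 b7 b8 b9 b10 b11 b12 : Bool),
    (b1 && b2 && b3 && b4 && b5 || (b2 && b3 && b4 && b5 && b6 || (b3 && b4 && b5 && b6 && b7 ||
      (b4 && b5 && b6 && b7 && b8 || (b5 && b6 && b7 && b8 && b9 || (b6 && b7 && b8 && b9 && b10 ||
      (b7 && b8 && b9 && b10 && b11 || b8 && b9 && b10 && b11 && b12)))))))
    = (sfRunStep b12 (sfRunStep b11 (sfRunStep b10 (sfRunStep b9 (sfRunStep b8 (sfRunStep b7
        (sfRunStep b6 (sfRunStep b5 (sfRunStep b4 (sfRunStep b3 (sfRunStep b2 (sfRunStep b1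
          ((0 : Int), false))))))))))))).2 := by
  decide

lemma sfStraight (g : Int → Bool) :
    (PySem.List.pyRange 1 9 1).any (fun i => g i && g (i + 1) && g (i + 2) && g (i + 3) && g (i + 4))
      = ((PySem.List.pyRange 1 13 1).foldl (fun st i => sfRunStep (g i) st) ((0 : Int), false)).2 := by
  rw [sfRange9, sfRange13]
  simp only [List.any_cons, List.any_nil, List.foldl_cons, List.foldl_nil]
  norm_num
  exact sfBool12 (g 1) (g 2) (g 3) (g 4) (g 5) (g 6) (g 7) (g 8) (g 9) (g 10) (g 11) (g 12)

-- ===== VERDICT (by name: the statement is the Claim_ definition above) =====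
theorem hasStraightFlush_spec : Claim_equal_hasStraightFlush := by
  intro S R _ hPre
  unfold Spec_hasStraightFlush hasStraightFlush hasStraightFlush_alt
  rw [sfAnyAndConst, sfFlush S hPre.1, sfStraight (sfLookup1 R)]
  cases h : (PySem.Dict.mk S).values.contains (5 : Int) <;> simp
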